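-- pv_equiv track=rewrite | github.com/Tim-427572/AoC | 2021/aoc2021.py | _unwind
-- ===== SOURCE A (Python) =====
-- def _unwind(transforms, start, visited, path_list):
--     """
--     A DFS to find the path between the scanner "start" and scanner 0.
--     """
--     visited[start]=True
--     path_list.append(start)
--     if start == 0:
--         return True
--     else:
--         for n in transforms:
--             if n[0] == start and not visited.get(n[1], False):
--                 test = _unwind(transforms, n[1], visited, path_list)
--                 if test:
--                     return test
--     path_list.pop()
--     visited[start]=False
--     return False
-- ===== SOURCE B (Python) =====
-- def _unwind(transforms, start, visited, path_list):
--     """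
--     Iterative DFS (explicit stack of (node, scan-index) frames) finding a path
--     from "start" to scanner 0; same return value and same final mutations of
--     visited/path_list as the recursive version.
--     """
--     visited[start] = True
--     path_list.append(start)
--     if start == 0:
--         return True
--     stack = [[start, 0]]
--     while stack:
--         node, i = stack[-1]
--         # advance to the next eligible outgoing edge of `node`
--         while i < len(transforms) and not (transforms[i][0] == node
--                                            and not visited.get(transforms[i][1], False)):
--             i += 1
--         if i == len(transforms):
--             # frame exhausted: backtrack
--             stack.pop()
--             path_list.pop()
--             visited[node] = False
--             continue
--         stack[-1][1] = i + 1
--         nxt = transforms[i][1]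
--         visited[nxt] = True
--         path_list.append(nxt)
--         if nxt == 0:
--             return True
--         stack.append([nxt, 0])
--     return False
-- ===== Notes on version B (the rewrite author's own statement) =====
-- stated objective: alternative
-- what changed: The recursive backtracking DFS is rewritten as an iterative loop over an explicit stack of (node, scan-index) frames, so no Python call recursion is used; traversal order, return value and the final mutations of visited/path_list are identical.
import Mathlib
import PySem

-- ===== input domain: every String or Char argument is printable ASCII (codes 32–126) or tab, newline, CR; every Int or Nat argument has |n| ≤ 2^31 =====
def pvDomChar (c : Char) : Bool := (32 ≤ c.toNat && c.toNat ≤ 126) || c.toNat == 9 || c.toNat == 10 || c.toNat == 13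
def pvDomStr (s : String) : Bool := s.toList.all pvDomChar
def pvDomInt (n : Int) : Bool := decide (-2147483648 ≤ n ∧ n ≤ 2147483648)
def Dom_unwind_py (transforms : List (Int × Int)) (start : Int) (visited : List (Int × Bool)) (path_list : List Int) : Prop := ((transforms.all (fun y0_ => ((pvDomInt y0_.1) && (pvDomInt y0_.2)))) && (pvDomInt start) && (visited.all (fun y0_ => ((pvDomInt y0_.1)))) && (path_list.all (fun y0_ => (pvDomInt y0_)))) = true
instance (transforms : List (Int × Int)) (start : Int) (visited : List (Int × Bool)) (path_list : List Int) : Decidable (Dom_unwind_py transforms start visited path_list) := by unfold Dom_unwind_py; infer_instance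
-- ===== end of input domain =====

-- B replaces A's recursive backtracking DFS by an iterative loop over an explicit stack of
-- (node, remaining-edges) frames (objective: alternative, same cost).  Both A and B mutate
-- `visited`/`path_list` identically in Python; the equivalence proved here is about the
-- RETURN value only.

-- ===== PORT A =====
-- A's recursion is not structurally decreasing, so the port threads the mutated state
-- (visited dict, path list) and uses fuel counting recursion DEPTH; fuel
-- `transforms.length + 1` is proved sufficient below (`unwindGoA_suff`), so the `none`
-- (out-of-fuel) branch is never taken.

-- the `for n in transforms:` loop of A (rec = the recursive call `_unwind(transforms, n[1], …)`)
def unwindLoopA (transforms : List (Int × Int))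
    (rec : Int → PySem.Dict Int Bool → List Int → Option (Bool × PySem.Dict Int Bool × List Int))
    (start : Int) :
    List (Int × Int) → PySem.Dict Int Bool → List Int → Option (Bool × PySem.Dict Int Bool × List Int)
  | [], v, p => some (false, v.insert start false, p.dropLast)  -- path_list.pop(); visited[start]=False; return False
  | e :: rest, v, p =>
    if e.1 = start ∧ v.getD e.2 false = false then   -- n[0] == start and not visited.get(n[1], False)
      match rec e.2 v p with
      | none => none
      | some (true, v', p') => some (true, v', p')   -- if test: return test
      | some (false, v', p') => unwindLoopA transforms rec start rest v' p'
    else unwindLoopA transforms rec start rest v p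

def unwindGoA (transforms : List (Int × Int)) :
    Nat → Int → PySem.Dict Int Bool → List Int → Option (Bool × PySem.Dict Int Bool × List Int)
  | 0, _, _, _ => none
  | f + 1, s, v, p =>
    let v1 := v.insert s true        -- visited[start] = True
    let p1 := p ++ [s]               -- path_list.append(start)
    if s = 0 then some (true, v1, p1)
    else unwindLoopA transforms (unwindGoA transforms f) s transforms v1 p1

def unwind_py (transforms : List (Int × Int)) (start : Int) (visited : List (Int × Bool)) (path_list : List Int) : Bool :=
  match unwindGoA transforms (transforms.length + 1) start (PySem.Dict.mk visited) path_list with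
  | some (b, _, _) => b
  | none => false

-- ===== PORT B =====
-- B's explicit-stack DFS: a frame is (node, remaining edges still to scan); fuel counts
-- machine steps (pushes/pops); `(length+2)^(length+2)` is proved sufficient below.

-- the inner `while i < len(transforms) and not (...)` scan of Source B
def unwindScanB (v : PySem.Dict Int Bool) (node : Int) :
    List (Int × Int) → Option (Int × List (Int × Int))
  | [] => none
  | e :: rest =>
    if e.1 = node ∧ v.getD e.2 false = false then some (e.2, rest)
    else unwindScanB v node rest

-- the `while stack:` loop of Source B
def unwindRunB (transforms : List (Int × Int)) :
    Nat → List (Int × List (Int × Int)) → PySem.Dict Int Bool → List Int → Option Bool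
  | 0, _, _, _ => none
  | _ + 1, [], _, _ => some false
  | f + 1, (node, rem) :: rest, v, p =>
    match unwindScanB v node rem with
    | none => unwindRunB transforms f rest (v.insert node false) p.dropLast  -- backtrack
    | some (t, rem') =>
      let v1 := v.insert t true
      let p1 := p ++ [t]
      if t = 0 then some true
      else unwindRunB transforms f ((t, transforms) :: (node, rem') :: rest) v1 p1

def unwind_py_alt (transforms : List (Int × Int)) (start : Int) (visited : List (Int × Bool)) (path_list : List Int) : Bool :=
  let v1 := (PySem.Dict.mk visited).insert start true
  let p1 := path_list ++ [start]
  if start = 0 then true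
  else
    match unwindRunB transforms ((transforms.length + 2) ^ (transforms.length + 2)) [(start, transforms)] v1 p1 with
    | some b => b
    | none => false

-- ===== PRECONDITION & SPEC =====
def Spec_unwind_py (transforms : List (Int × Int)) (start : Int) (visited : List (Int × Bool)) (path_list : List Int) (out : Bool) : Prop := out = unwind_py_alt transforms start visited path_list
instance (transforms : List (Int × Int)) (start : Int) (visited : List (Int × Bool)) (path_list : List Int) (out : Bool) : Decidable (Spec_unwind_py transforms start visited path_list out) := by unfold Spec_unwind_py; infer_instance

-- ===== CLAIM (what is proved, stated in full; the proofs are below) =====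
def Claim_equal_unwind_py : Prop := ∀ (transforms : List (Int × Int)) (start : Int) (visited : List (Int × Bool)) (path_list : List Int), Dom_unwind_py transforms start visited path_list → Spec_unwind_py transforms start visited path_list (unwind_py transforms start visited path_list)

-- ===== LEMMAS AND PROOFS =====

-- ---- step equations ----
theorem loopA_nil (T : List (Int × Int)) (rec : Int → PySem.Dict Int Bool → List Int → Option (Bool × PySem.Dict Int Bool × List Int)) (s : Int) (v : PySem.Dict Int Bool) (p : List Int) :
    unwindLoopA T rec s [] v p = some (false, v.insert s false, p.dropLast) := rfl

theorem loopA_cons_neg (T : List (Int × Int)) (rec : Int → PySem.Dict Int Bool → List Int → Option (Bool × PySem.Dict Int Bool × List Int)) (s : Int) (e : Int × Int) (rest : List (Int × Int)) (v : PySem.Dict Int Bool) (p : List Int)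
    (hc : ¬ (e.1 = s ∧ v.getD e.2 false = false)) :
    unwindLoopA T rec s (e :: rest) v p = unwindLoopA T rec s rest v p := by
  simp [unwindLoopA, hc]

theorem loopA_cons_none (T : List (Int × Int)) (rec : Int → PySem.Dict Int Bool → List Int → Option (Bool × PySem.Dict Int Bool × List Int)) (s : Int) (e : Int × Int) (rest : List (Int × Int)) (v : PySem.Dict Int Bool) (p : List Int)
    (hc : e.1 = s ∧ v.getD e.2 false = false) (hr : rec e.2 v p = none) :
    unwindLoopA T rec s (e :: rest) v p = none := by
  simp [unwindLoopA, hc, hr]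

theorem loopA_cons_true (T : List (Int × Int)) (rec : Int → PySem.Dict Int Bool → List Int → Option (Bool × PySem.Dict Int Bool × List Int)) (s : Int) (e : Int × Int) (rest : List (Int × Int)) (v v' : PySem.Dict Int Bool) (p p' : List Int)
    (hc : e.1 = s ∧ v.getD e.2 false = false) (hr : rec e.2 v p = some (true, v', p')) :
    unwindLoopA T rec s (e :: rest) v p = some (true, v', p') := by
  simp [unwindLoopA, hc, hr]

theorem loopA_cons_false (T : List (Int × Int)) (rec : Int → PySem.Dict Int Bool → List Int → Option (Bool × PySem.Dict Int Bool × List Int)) (s : Int) (e : Int × Int) (rest : List (Int × Int)) (v v' : PySem.Dict Int Bool) (p p' : List Int)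
    (hc : e.1 = s ∧ v.getD e.2 false = false) (hr : rec e.2 v p = some (false, v', p')) :
    unwindLoopA T rec s (e :: rest) v p = unwindLoopA T rec s rest v' p' := by
  simp [unwindLoopA, hc, hr]

theorem goA_zero (T : List (Int × Int)) (s : Int) (v : PySem.Dict Int Bool) (p : List Int) :
    unwindGoA T 0 s v p = none := rfl

theorem goA_succ_zero (T : List (Int × Int)) (f : Nat) (v : PySem.Dict Int Bool) (p : List Int) :
    unwindGoA T (f + 1) 0 v p = some (true, v.insert 0 true, p ++ [0]) := rfl

theorem goA_succ_pos (T : List (Int × Int)) (f : Nat) (s : Int) (v : PySem.Dict Int Bool) (p : List Int) (hs : s ≠ 0) :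
    unwindGoA T (f + 1) s v p = unwindLoopA T (unwindGoA T f) s T (v.insert s true) (p ++ [s]) := by
  simp [unwindGoA, hs]

theorem scan_cons_pos (v : PySem.Dict Int Bool) (s : Int) (e : Int × Int) (rest : List (Int × Int))
    (hc : e.1 = s ∧ v.getD e.2 false = false) :
    unwindScanB v s (e :: rest) = some (e.2, rest) := by
  simp [unwindScanB, hc]

theorem scan_cons_neg (v : PySem.Dict Int Bool) (s : Int) (e : Int × Int) (rest : List (Int × Int))
    (hc : ¬ (e.1 = s ∧ v.getD e.2 false = false)) :
    unwindScanB v s (e :: rest) = unwindScanB v s rest := by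
  simp [unwindScanB, hc]

theorem runB_frame_none (T : List (Int × Int)) (f : Nat) (node : Int) (rem : List (Int × Int)) (rest : List (Int × List (Int × Int))) (v : PySem.Dict Int Bool) (p : List Int)
    (hscan : unwindScanB v node rem = none) :
    unwindRunB T (f + 1) ((node, rem) :: rest) v p = unwindRunB T f rest (v.insert node false) p.dropLast := by
  simp [unwindRunB, hscan]

theorem runB_frame_zero (T : List (Int × Int)) (f : Nat) (node : Int) (rem rem' : List (Int × Int)) (rest : List (Int × List (Int × Int))) (v : PySem.Dict Int Bool) (p : List Int)
    (hscan : unwindScanB v node rem = some (0, rem')) :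
    unwindRunB T (f + 1) ((node, rem) :: rest) v p = some true := by
  simp [unwindRunB, hscan]

theorem runB_frame_push (T : List (Int × Int)) (f : Nat) (node t : Int) (rem rem' : List (Int × Int)) (rest : List (Int × List (Int × Int))) (v : PySem.Dict Int Bool) (p : List Int)
    (hscan : unwindScanB v node rem = some (t, rem')) (ht : t ≠ 0) :
    unwindRunB T (f + 1) ((node, rem) :: rest) v p
      = unwindRunB T f ((t, T) :: (node, rem') :: rest) (v.insert t true) (p ++ [t]) := by
  simp [unwindRunB, hscan, ht]

-- ---- fuel monotonicity of the machine ----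
theorem runB_mono (T : List (Int × Int)) : ∀ (f : Nat) (st : List (Int × List (Int × Int))) (v : PySem.Dict Int Bool) (p : List Int) (b : Bool),
    unwindRunB T f st v p = some b → unwindRunB T (f + 1) st v p = some b := by
  intro f
  induction f with
  | zero => intro st v p b h; simp [unwindRunB] at h
  | succ f ih =>
    intro st v p b h
    match st with
    | [] => simpa [unwindRunB] using h
    | (node, rem) :: rest =>
      cases hscan : unwindScanB v node rem with
      | none =>
        rw [runB_frame_none T f node rem rest v p hscan] at h
        rw [runB_frame_none T (f + 1) node rem rest v p hscan]
        exact ih _ _ _ _ h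
      | some tr =>
        obtain ⟨t, rem'⟩ := tr
        by_cases ht : t = 0
        · subst ht
          rw [runB_frame_zero T f node rem rem' rest v p hscan] at h
          rw [runB_frame_zero T (f + 1) node rem rem' rest v p hscan]
          exact h
        · rw [runB_frame_push T f node t rem rem' rest v p hscan ht] at h
          rw [runB_frame_push T (f + 1) node t rem rem' rest v p hscan ht]
          exact ih _ _ _ _ h

theorem runB_le (T : List (Int × Int)) {f g : Nat} (hfg : f ≤ g) (st : List (Int × List (Int × Int))) (v : PySem.Dict Int Bool) (p : List Int) (b : Bool)
    (h : unwindRunB T f st v p = some b) : unwindRunB T g st v p = some b := by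
  induction hfg with
  | refl => exact h
  | step _ ih => exact runB_mono T _ _ _ _ _ ih

theorem runB_skip (T : List (Int × Int)) (f : Nat) (s : Int) (e : Int × Int) (rem : List (Int × Int)) (rest : List (Int × List (Int × Int))) (v : PySem.Dict Int Bool) (p : List Int)
    (hc : ¬ (e.1 = s ∧ v.getD e.2 false = false)) :
    unwindRunB T (f + 1) ((s, e :: rem) :: rest) v p = unwindRunB T (f + 1) ((s, rem) :: rest) v p := by
  rw [show unwindRunB T (f+1) ((s, e :: rem) :: rest) v p
        = (match unwindScanB v s (e :: rem) with
           | none => unwindRunB T f rest (v.insert s false) p.dropLast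
           | some (t, rem') =>
             if t = 0 then some true
             else unwindRunB T f ((t, T) :: (s, rem') :: rest) (v.insert t true) (p ++ [t])) from rfl]
  rw [show unwindRunB T (f+1) ((s, rem) :: rest) v p
        = (match unwindScanB v s rem with
           | none => unwindRunB T f rest (v.insert s false) p.dropLast
           | some (t, rem') =>
             if t = 0 then some true
             else unwindRunB T f ((t, T) :: (s, rem') :: rest) (v.insert t true) (p ++ [t])) from rfl]
  rw [scan_cons_neg v s e rem hc]

-- ---- visited-state preservation (a failed call restores the dict, getD-wise) ----
theorem loop_pres (T : List (Int × Int)) (rec : Int → PySem.Dict Int Bool → List Int → Option (Bool × PySem.Dict Int Bool × List Int)) (s : Int)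
    (hrec : ∀ t v p v' p', rec t v p = some (false, v', p') →
      ∀ k, v'.getD k false = (v.insert t false).getD k false) :
    ∀ (rem : List (Int × Int)) (v : PySem.Dict Int Bool) (p : List Int) (v2 : PySem.Dict Int Bool) (p2 : List Int),
      unwindLoopA T rec s rem v p = some (false, v2, p2) →
      ∀ k, v2.getD k false = (v.insert s false).getD k false := by
  intro rem
  induction rem with
  | nil =>
    intro v p v2 p2 h k
    rw [loopA_nil] at h
    obtain ⟨h1, h2⟩ := by simpa using h
    rw [← h1]
  | cons e rest ih =>
    intro v p v2 p2 h k
    by_cases hc : e.1 = s ∧ v.getD e.2 false = false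
    · cases hr : rec e.2 v p with
      | none => rw [loopA_cons_none T rec s e rest v p hc hr] at h; cases h
      | some r =>
        obtain ⟨b, v', p'⟩ := r
        cases b
        · rw [loopA_cons_false T rec s e rest v v' p p' hc hr] at h
          have hstep := hrec e.2 v p v' p' hr
          have hrest := ih v' p' v2 p2 h k
          rw [hrest, PySem.Dict.getD_insert, PySem.Dict.getD_insert]
          by_cases hk : k = s
          · simp [hk]
          · simp only [if_neg hk]
            rw [hstep k, PySem.Dict.getD_insert]
            by_cases hk2 : k = e.2
            · simp [hk2, hc.2]
            · simp [hk2]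
        · rw [loopA_cons_true T rec s e rest v v' p p' hc hr] at h
          simp at h
    · rw [loopA_cons_neg T rec s e rest v p hc] at h
      exact ih v p v2 p2 h k

theorem goA_pres (T : List (Int × Int)) : ∀ (f : Nat) (t : Int) (v : PySem.Dict Int Bool) (p : List Int) (v' : PySem.Dict Int Bool) (p' : List Int),
    unwindGoA T f t v p = some (false, v', p') →
    ∀ k, v'.getD k false = (v.insert t false).getD k false := by
  intro f
  induction f with
  | zero => intro t v p v' p' h; rw [goA_zero] at h; cases h
  | succ f ih =>
    intro t v p v' p' h k
    by_cases ht : t = 0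
    · subst ht; rw [goA_succ_zero] at h; simp at h
    · rw [goA_succ_pos T f t v p ht] at h
      have := loop_pres T (unwindGoA T f) t ih T (v.insert t true) (p ++ [t]) v' p' h k
      rw [this, PySem.Dict.getD_insert, PySem.Dict.getD_insert, PySem.Dict.getD_insert]
      by_cases hk : k = t <;> simp [hk]

-- ---- counting unvisited edge targets (fuel sufficiency for A) ----
def Ucnt (T : List (Int × Int)) (v : PySem.Dict Int Bool) : Nat :=
  (((T.map Prod.snd).dedup).filter (fun t => !(v.getD t false))).length

theorem filter_len_mono (l : List Int) (p q : Int → Bool) (h : ∀ x, q x = true → p x = true) :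
    (l.filter q).length ≤ (l.filter p).length := by
  induction l with
  | nil => simp
  | cons a l ih =>
    simp only [List.filter_cons]
    by_cases hq : q a = true
    · rw [hq, h a hq]; simpa using ih
    · simp only [Bool.not_eq_true] at hq
      rw [hq]
      cases hp : p a <;> simp <;> omega

theorem filter_len_strict (l : List Int) (p q : Int → Bool) (t : Int) (ht : t ∈ l) (hpt : p t = true)
    (h : ∀ x, q x = if x = t then false else p x) :
    (l.filter q).length < (l.filter p).length := by
  induction l with
  | nil => cases ht
  | cons a l ih =>
    by_cases hat : a = t
    · have hq : q a = false := by rw [h, if_pos hat]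
      have hpa : p a = true := by rw [hat]; exact hpt
      have hmono : (l.filter q).length ≤ (l.filter p).length := by
        apply filter_len_mono
        intro x hx
        by_cases hxt : x = t
        · rw [h x, if_pos hxt] at hx; cases hx
        · rw [h x, if_neg hxt] at hx; exact hx
      simp only [List.filter_cons, hq, hpa]
      simp
      omega
    · have hqa : q a = p a := by rw [h, if_neg hat]
      have ht' : t ∈ l := by
        rcases List.mem_cons.mp ht with h1 | h1
        · exact absurd h1.symm hat
        · exact h1
      simp only [List.filter_cons, hqa]
      cases hpa : p a
      · simpa using ih ht'
      · simpa using Nat.succ_lt_succ (ih ht')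

theorem Ucnt_congr (T : List (Int × Int)) (v w : PySem.Dict Int Bool)
    (h : ∀ k, v.getD k false = w.getD k false) : Ucnt T v = Ucnt T w := by
  unfold Ucnt
  rw [List.filter_congr (fun x _ => by rw [h x])]

theorem Ucnt_le (T : List (Int × Int)) (v : PySem.Dict Int Bool) : Ucnt T v ≤ T.length := by
  unfold Ucnt
  calc (((T.map Prod.snd).dedup).filter (fun t => !(v.getD t false))).length
      ≤ ((T.map Prod.snd).dedup).length := List.length_filter_le _ _
    _ ≤ (T.map Prod.snd).length := (List.dedup_sublist _).length_le
    _ = T.length := List.length_map ..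

theorem Ucnt_insert_lt (T : List (Int × Int)) (v : PySem.Dict Int Bool) (t : Int)
    (h0 : v.getD t false = false) (hmem : t ∈ T.map Prod.snd) :
    Ucnt T (v.insert t true) < Ucnt T v := by
  unfold Ucnt
  apply filter_len_strict _ _ _ t (List.mem_dedup.mpr hmem) (by simp [h0])
  intro x
  rw [PySem.Dict.getD_insert]
  by_cases hx : x = t <;> simp [hx]

-- ---- fuel sufficiency for A's port ----
theorem loop_suff (T : List (Int × Int)) (f : Nat) (s : Int)
    (hrec : ∀ t (v : PySem.Dict Int Bool) (p : List Int), Ucnt T (v.insert t true) < f → ∃ r, unwindGoA T f t v p = some r) :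
    ∀ (rem : List (Int × Int)), (∀ e ∈ rem, e.2 ∈ T.map Prod.snd) →
      ∀ (v : PySem.Dict Int Bool) (p : List Int), Ucnt T v ≤ f →
        ∃ r, unwindLoopA T (unwindGoA T f) s rem v p = some r := by
  intro rem
  induction rem with
  | nil => intro _ v p _; exact ⟨_, loopA_nil T _ s v p⟩
  | cons e rest ih =>
    intro hmem v p hU
    by_cases hc : e.1 = s ∧ v.getD e.2 false = false
    · have hlt : Ucnt T (v.insert e.2 true) < f :=
        Nat.lt_of_lt_of_le (Ucnt_insert_lt T v e.2 hc.2 (hmem e List.mem_cons_self)) hU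
      obtain ⟨r, hr⟩ := hrec e.2 v p hlt
      obtain ⟨b, v', p'⟩ := r
      cases b
      · have hU' : Ucnt T v' ≤ f := by
          have heq : Ucnt T v' = Ucnt T v := by
            apply Ucnt_congr
            intro k
            rw [goA_pres T f e.2 v p v' p' hr k, PySem.Dict.getD_insert]
            by_cases hk : k = e.2
            · simp [hk, hc.2]
            · simp [hk]
          omega
        obtain ⟨r2, hr2⟩ := ih (fun x hx => hmem x (List.mem_cons_of_mem _ hx)) v' p' hU'
        exact ⟨r2, by rw [loopA_cons_false T _ s e rest v v' p p' hc hr]; exact hr2⟩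
      · exact ⟨_, loopA_cons_true T _ s e rest v v' p p' hc hr⟩
    · obtain ⟨r2, hr2⟩ := ih (fun x hx => hmem x (List.mem_cons_of_mem _ hx)) v p hU
      exact ⟨r2, by rw [loopA_cons_neg T _ s e rest v p hc]; exact hr2⟩

theorem goA_suff (T : List (Int × Int)) : ∀ (f : Nat) (s : Int) (v : PySem.Dict Int Bool) (p : List Int),
    Ucnt T (v.insert s true) < f → ∃ r, unwindGoA T f s v p = some r := by
  intro f
  induction f with
  | zero => intro s v p h; exact absurd h (Nat.not_lt_zero _)
  | succ f ih =>
    intro s v p h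
    by_cases hs : s = 0
    · subst hs; exact ⟨_, goA_succ_zero T f v p⟩
    · rw [goA_succ_pos T f s v p hs]
      apply loop_suff T f s ih T
        (fun e he => List.mem_map.mpr ⟨e, he, rfl⟩)
        (v.insert s true) (p ++ [s])
      omega

-- ---- quantitative simulation: A's recursion → B's machine ----
def Xf (T : List (Int × Int)) (f : Nat) : Nat := (T.length + 2) ^ (f + 1)

theorem Xf_key (T : List (Int × Int)) (f : Nat) :
    T.length * (Xf T f + 1) + 2 ≤ Xf T (f + 1) := by
  unfold Xf
  have h1 : T.length + 2 ≤ (T.length + 2) ^ (f + 1) := Nat.le_self_pow (Nat.succ_ne_zero f) _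
  have h2 : (T.length + 2) ^ (f + 1 + 1) = T.length * (T.length + 2) ^ (f + 1) + 2 * (T.length + 2) ^ (f + 1) := by
    rw [pow_succ]; ring
  have h3 : T.length * ((T.length + 2) ^ (f + 1) + 1) = T.length * (T.length + 2) ^ (f + 1) + T.length := by ring
  rw [h2, h3]
  linarith

def HrecP (T : List (Int × Int)) (f : Nat) : Prop :=
  ∀ (t : Int) (v : PySem.Dict Int Bool) (p : List Int) (r : Bool × PySem.Dict Int Bool × List Int),
    unwindGoA T f t v p = some r → t ≠ 0 →
    (r.1 = true → ∀ (rest : List (Int × List (Int × Int))) (g : Nat),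
      unwindRunB T (g + Xf T f) ((t, T) :: rest) (v.insert t true) (p ++ [t]) = some true) ∧
    (r.1 = false → ∀ (rest : List (Int × List (Int × Int))) (g : Nat) (b : Bool),
      unwindRunB T g rest r.2.1 r.2.2 = some b →
      unwindRunB T (g + Xf T f) ((t, T) :: rest) (v.insert t true) (p ++ [t]) = some b)

theorem loop_sim (T : List (Int × Int)) (f : Nat) (hrec : HrecP T f) (s : Int) :
    ∀ (rem : List (Int × Int)) (v : PySem.Dict Int Bool) (p : List Int) (r : Bool × PySem.Dict Int Bool × List Int),
      unwindLoopA T (unwindGoA T f) s rem v p = some r →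
      (r.1 = true → ∀ (rest : List (Int × List (Int × Int))) (g : Nat),
        unwindRunB T (g + rem.length * (Xf T f + 1) + 1) ((s, rem) :: rest) v p = some true) ∧
      (r.1 = false → ∀ (rest : List (Int × List (Int × Int))) (g : Nat) (b : Bool),
        unwindRunB T g rest r.2.1 r.2.2 = some b →
        unwindRunB T (g + rem.length * (Xf T f + 1) + 1) ((s, rem) :: rest) v p = some b) := by
  intro rem
  induction rem with
  | nil =>
    intro v p r h
    rw [loopA_nil] at h
    obtain rfl : (false, v.insert s false, p.dropLast) = r := by simpa using h
    constructor
    · intro h1; cases h1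
    · intro _ rest g b hb
      simp only [List.length_nil, Nat.zero_mul, Nat.add_zero]
      rw [runB_frame_none T g s [] rest v p rfl]
      exact hb
  | cons e rest' ih =>
    intro v p r h
    by_cases hc : e.1 = s ∧ v.getD e.2 false = false
    · have hscan : unwindScanB v s (e :: rest') = some (e.2, rest') := scan_cons_pos v s e rest' hc
      cases hr : unwindGoA T f e.2 v p with
      | none => rw [loopA_cons_none T _ s e rest' v p hc hr] at h; cases h
      | some r' =>
        obtain ⟨b', v', p'⟩ := r'
        have hf : f ≠ 0 := by rintro rfl; rw [goA_zero] at hr; cases hr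
        obtain ⟨f', rfl⟩ := Nat.exists_eq_succ_of_ne_zero hf
        cases b'
        · -- recursive call failed; loop continues with restored state
          rw [loopA_cons_false T _ s e rest' v v' p p' hc hr] at h
          have ht : e.2 ≠ 0 := by
            rintro h0
            rw [h0, goA_succ_zero] at hr
            simp at hr
          have hIH := ih v' p' r h
          have hrecF := (hrec e.2 v p (false, v', p') hr ht).2 rfl
          constructor
          · intro h1 rest g
            have h2 := hIH.1 h1 rest g
            have h3 := hrecF ((s, rest') :: rest) (g + rest'.length * (Xf T (f' + 1) + 1) + 1) true h2
            have hfe : g + rest'.length * (Xf T (f' + 1) + 1) + 1 + Xf T (f' + 1)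
                = g + (e :: rest').length * (Xf T (f' + 1) + 1) := by
              simp only [List.length_cons]; ring
            rw [hfe] at h3
            rw [runB_frame_push T (g + (e :: rest').length * (Xf T (f' + 1) + 1)) s e.2 (e :: rest') rest' rest v p hscan ht]
            exact h3
          · intro h1 rest g b hb
            have h2 := hIH.2 h1 rest g b hb
            have h3 := hrecF ((s, rest') :: rest) (g + rest'.length * (Xf T (f' + 1) + 1) + 1) b h2
            have hfe : g + rest'.length * (Xf T (f' + 1) + 1) + 1 + Xf T (f' + 1)
                = g + (e :: rest').length * (Xf T (f' + 1) + 1) := by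
              simp only [List.length_cons]; ring
            rw [hfe] at h3
            rw [runB_frame_push T (g + (e :: rest').length * (Xf T (f' + 1) + 1)) s e.2 (e :: rest') rest' rest v p hscan ht]
            exact h3
        · -- recursive call succeeded
          rw [loopA_cons_true T _ s e rest' v v' p p' hc hr] at h
          obtain rfl : (true, v', p') = r := by simpa using h
          refine ⟨?_, ?_⟩
          · intro _ rest g
            by_cases ht : e.2 = 0
            · rw [runB_frame_zero T (g + (e :: rest').length * (Xf T (f' + 1) + 1)) s (e :: rest') rest' rest v p (ht ▸ hscan)]
            · have h3 := ((hrec e.2 v p (true, v', p') hr ht).1 rfl) ((s, rest') :: rest)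
                (g + rest'.length * (Xf T (f' + 1) + 1) + 1)
              have hfe : g + rest'.length * (Xf T (f' + 1) + 1) + 1 + Xf T (f' + 1)
                  = g + (e :: rest').length * (Xf T (f' + 1) + 1) := by
                simp only [List.length_cons]; ring
              rw [hfe] at h3
              rw [runB_frame_push T (g + (e :: rest').length * (Xf T (f' + 1) + 1)) s e.2 (e :: rest') rest' rest v p hscan ht]
              exact h3
          · intro h1; cases h1
    · rw [loopA_cons_neg T _ s e rest' v p hc] at h
      have hIH := ih v p r h
      have hle : ∀ g : Nat, g + rest'.length * (Xf T f + 1) + 1 ≤ g + (e :: rest').length * (Xf T f + 1) + 1 := by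
        intro g
        have : rest'.length * (Xf T f + 1) ≤ (e :: rest').length * (Xf T f + 1) := by
          apply Nat.mul_le_mul_right
          simp
        omega
      constructor
      · intro h1 rest g
        have h2 := hIH.1 h1 rest g
        have h3 := runB_le T (hle g) _ _ _ _ h2
        have hsucc : g + (e :: rest').length * (Xf T f + 1) + 1
            = (g + (e :: rest').length * (Xf T f + 1)) + 1 := rfl
        rw [runB_skip T (g + (e :: rest').length * (Xf T f + 1)) s e rest' rest v p hc]
        exact h3
      · intro h1 rest g b hb
        have h2 := hIH.2 h1 rest g b hb
        have h3 := runB_le T (hle g) _ _ _ _ h2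
        rw [runB_skip T (g + (e :: rest').length * (Xf T f + 1)) s e rest' rest v p hc]
        exact h3

theorem hrec_all (T : List (Int × Int)) : ∀ f, HrecP T f := by
  intro f
  induction f with
  | zero => intro t v p r h ht; rw [goA_zero] at h; cases h
  | succ f ih =>
    intro t v p r h ht
    rw [goA_succ_pos T f t v p ht] at h
    have hsim := loop_sim T f ih t T (v.insert t true) (p ++ [t]) r h
    have hle : ∀ g : Nat, g + T.length * (Xf T f + 1) + 1 ≤ g + Xf T (f + 1) := by
      intro g
      have := Xf_key T f
      omega
    constructor
    · intro h1 rest g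
      exact runB_le T (hle g) _ _ _ _ (hsim.1 h1 rest g)
    · intro h1 rest g b hb
      exact runB_le T (hle g) _ _ _ _ (hsim.2 h1 rest g b hb)

-- ===== VERDICT (by name: the statement is the Claim_ definition above) =====
theorem unwind_py_spec : Claim_equal_unwind_py := by
  intro T s visited p _
  unfold Spec_unwind_py
  by_cases hs : s = 0
  · subst hs
    unfold unwind_py unwind_py_alt
    rw [goA_succ_zero]
    simp
  · obtain ⟨r, hr⟩ := goA_suff T (T.length + 1) s (PySem.Dict.mk visited) p
      (by have := Ucnt_le T ((PySem.Dict.mk visited).insert s true); omega)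
    obtain ⟨b, v2, p2⟩ := r
    have hloop : unwindLoopA T (unwindGoA T T.length) s T ((PySem.Dict.mk visited).insert s true) (p ++ [s]) = some (b, v2, p2) := by
      rw [← goA_succ_pos T T.length s (PySem.Dict.mk visited) p hs]
      exact hr
    have hsim := loop_sim T T.length (hrec_all T T.length) s T _ _ _ hloop
    have hA : unwind_py T s visited p = b := by unfold unwind_py; rw [hr]
    rw [hA]
    have hkey := Xf_key T T.length
    have hBIG : Xf T (T.length + 1) = (T.length + 2) ^ (T.length + 2) := rfl
    unfold unwind_py_alt
    simp only [if_neg hs]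
    cases b
    · have hrun0 : unwindRunB T 1 [] v2 p2 = some false := rfl
      have h2 := hsim.2 rfl [] 1 false hrun0
      have h3 := runB_le T (show 1 + T.length * (Xf T T.length + 1) + 1 ≤ (T.length + 2) ^ (T.length + 2) by
        rw [← hBIG]; omega) _ _ _ _ h2
      rw [h3]
    · have h2 := hsim.1 rfl [] 0
      have h3 := runB_le T (show 0 + T.length * (Xf T T.length + 1) + 1 ≤ (T.length + 2) ^ (T.length + 2) by
        rw [← hBIG]; omega) _ _ _ _ h2
      rw [h3]
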